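-- pv_equiv track=rewrite | github.com/pogorelov-labs/city-rating-tokyo | scripts/fix-station-romanization.py | fix_capitalization
-- ===== SOURCE A (Python) =====
-- def fix_capitalization(name: str) -> str:
--     """Capitalize first letter of each hyphen-separated part."""
--     parts = name.split("-")
--     fixed = []
--     for p in parts:
--         if not p:
--             fixed.append(p)
--         elif p[0] == "(" or p[0] == ")":
--             # Preserve parenthesized parts like (-Daini-...)
--             fixed.append(p)
--         else:
--             fixed.append(p[0].upper() + p[1:])
--     return "-".join(fixed)
-- ===== SOURCE B (Python) =====
-- def fix_capitalization(name: str) -> str: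
--     """Capitalize first letter of each hyphen-separated part."""
--     out = []
--     flag = True  # at string start and right after a '-'
--     for ch in name:
--         out.append(ch.upper() if flag and ch not in "()" else ch)
--         flag = ch == "-"
--     return "".join(out)
-- ===== Notes on version B (the rewrite author's own statement) =====
-- stated objective: simpler
-- what changed: Replaced the hyphen-split / per-part fix-up / join over an intermediate parts list by a single left-to-right character scan carrying a capitalize-next boolean flag (set at the start and after each hyphen).
import Mathlib
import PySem

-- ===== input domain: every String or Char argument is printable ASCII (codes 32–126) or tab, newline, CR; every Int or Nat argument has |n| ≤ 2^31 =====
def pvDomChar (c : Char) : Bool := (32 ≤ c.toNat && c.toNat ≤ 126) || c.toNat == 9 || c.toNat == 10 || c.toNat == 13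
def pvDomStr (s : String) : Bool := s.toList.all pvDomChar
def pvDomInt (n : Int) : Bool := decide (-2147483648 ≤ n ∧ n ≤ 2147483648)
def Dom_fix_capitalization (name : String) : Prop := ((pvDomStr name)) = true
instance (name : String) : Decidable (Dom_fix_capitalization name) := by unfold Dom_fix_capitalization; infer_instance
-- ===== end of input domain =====

-- B replaces A's split/map/join over the parts list by a single character scan with a
-- capitalize-next flag (objective: simpler — no intermediate parts list is built).

-- ===== PORT A =====
-- parts = hyphen-split of name; loop appending to `fixed`; hyphen-join of fixed
def fix_capitalization (name : String) : String :=
  String.ofList (PySem.Chars.join ['-']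
    ((PySem.Chars.splitOn name.toList ['-']).foldl (fun fixed p =>
    if p = [] then
      fixed ++ [p]
    else if PySem.List.pyGet? p 0 = some '(' ∨ PySem.List.pyGet? p 0 = some ')' then
      fixed ++ [p]
    else
      match PySem.List.pyGet? p 0 with
      | some c => fixed ++ [PySem.Chars.upperChar c :: PySem.List.slice p (some 1) none]
      | none => fixed ++ [p]) []))

-- ===== PORT B =====
-- single scan: flag is true at the start and right after a hyphen
def pvScan : Bool → List Char → List Char
  | _, [] => []
  | flag, c :: rest =>
      (if flag && !(c = '(') && !(c = ')') then PySem.Chars.upperChar c else c)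
        :: pvScan (c = '-') rest

def fix_capitalization_alt (name : String) : String :=
  String.ofList (pvScan true name.toList)

-- ===== PRECONDITION & SPEC =====
def Spec_fix_capitalization (name : String) (out : String) : Prop := out = fix_capitalization_alt name
instance (name : String) (out : String) : Decidable (Spec_fix_capitalization name out) := by unfold Spec_fix_capitalization; infer_instance

-- ===== CLAIM (what is proved, stated in full; the proofs are below) =====
def Claim_equal_fix_capitalization : Prop := ∀ (name : String), Dom_fix_capitalization name → Spec_fix_capitalization name (fix_capitalization name)

-- ===== LEMMAS AND PROOFS =====

-- simple structural characterisation of splitting on hyphens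
def pvSplitDash : List Char → List (List Char)
  | [] => [[]]
  | c :: rest =>
      if c = '-' then [] :: pvSplitDash rest
      else
        match pvSplitDash rest with
        | p :: ps => (c :: p) :: ps
        | [] => [[c]]

theorem pvSplitDash_ne_nil (cs : List Char) : pvSplitDash cs ≠ [] := by
  cases cs with
  | nil => simp [pvSplitDash]
  | cons c rest =>
    simp only [pvSplitDash]
    split
    · simp
    · split <;> simp

-- what A's loop body does to one part
def pvFixA (p : List Char) : List Char :=
  if p = [] then p
  else if PySem.List.pyGet? p 0 = some '(' ∨ PySem.List.pyGet? p 0 = some ')' then p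
  else
    match PySem.List.pyGet? p 0 with
    | some c => PySem.Chars.upperChar c :: PySem.List.slice p (some 1) none
    | none => p

theorem pvFoldl_eq_map (parts : List (List Char)) (acc : List (List Char)) :
    parts.foldl (fun fixed p =>
      if p = [] then fixed ++ [p]
      else if PySem.List.pyGet? p 0 = some '(' ∨ PySem.List.pyGet? p 0 = some ')' then fixed ++ [p]
      else
        match PySem.List.pyGet? p 0 with
        | some c => fixed ++ [PySem.Chars.upperChar c :: PySem.List.slice p (some 1) none]
        | none => fixed ++ [p]) acc
    = acc ++ parts.map pvFixA := by
  induction parts generalizing acc with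
  | nil => simp
  | cons p ps ih =>
    simp only [List.foldl_cons, List.map_cons, ih]
    have hb : (if p = [] then acc ++ [p]
        else if PySem.List.pyGet? p 0 = some '(' ∨ PySem.List.pyGet? p 0 = some ')' then acc ++ [p]
        else
          match PySem.List.pyGet? p 0 with
          | some c => acc ++ [PySem.Chars.upperChar c :: PySem.List.slice p (some 1) none]
          | none => acc ++ [p]) = acc ++ [pvFixA p] := by
      unfold pvFixA
      split_ifs <;> try rfl
      cases PySem.List.pyGet? p 0 <;> rfl
    rw [hb, List.append_assoc]
    rfl

-- the fueled PySem split on a one-hyphen separator is pvSplitDash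
def pvConsHead (x : List Char) : List (List Char) → List (List Char)
  | [] => [x]
  | p :: ps => (x ++ p) :: ps

theorem pvGo_eq (cs : List Char) : ∀ (fuel : Nat) (cur : List Char) (acc : List (List Char)),
    cs.length < fuel →
    PySem.Chars.splitOn.go ['-'] fuel cs cur acc
      = acc.reverse ++ pvConsHead cur.reverse (pvSplitDash cs) := by
  induction cs with
  | nil =>
    intro fuel cur acc h
    match fuel with
    | fuel + 1 => simp [PySem.Chars.splitOn.go, pvSplitDash, pvConsHead]
  | cons c rest ih =>
    intro fuel cur acc h
    match fuel with
    | fuel + 1 =>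
      simp only [PySem.Chars.splitOn.go]
      by_cases hc : c = '-'
      · subst hc
        rw [if_pos (by simp [List.isPrefixOf])]
        rw [show List.drop (['-'] : List Char).length ('-' :: rest) = rest from rfl]
        rw [ih fuel [] (cur.reverse :: acc) (by simpa using h)]
        have hne := pvSplitDash_ne_nil rest
        simp only [pvSplitDash, if_pos]
        cases hsd : pvSplitDash rest with
        | nil => exact absurd hsd hne
        | cons p ps => simp [pvConsHead]
      · rw [if_neg (by
            simp only [List.isPrefixOf, Bool.and_eq_true, beq_iff_eq]
            exact fun hh => hc hh.1.symm)]
        rw [ih fuel (c :: cur) acc (by simpa using Nat.lt_of_succ_lt_succ h)]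
        have hne := pvSplitDash_ne_nil rest
        simp only [pvSplitDash, if_neg hc]
        cases hsd : pvSplitDash rest with
        | nil => exact absurd hsd hne
        | cons p ps => simp [pvConsHead]

theorem pvSplitOn_dash (cs : List Char) :
    PySem.Chars.splitOn cs ['-'] = pvSplitDash cs := by
  unfold PySem.Chars.splitOn
  rw [pvGo_eq cs (cs.length + 1) [] [] (Nat.lt_succ_self _)]
  have hne := pvSplitDash_ne_nil cs
  cases hsd : pvSplitDash cs with
  | nil => exact absurd hsd hne
  | cons p ps => simp [pvConsHead]

-- the single-character step applied to a leading char
def pvFix1 (c : Char) : Char :=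
  if c = '(' ∨ c = ')' then c else PySem.Chars.upperChar c

theorem pvFixA_cons (c : Char) (p : List Char) :
    pvFixA (c :: p) = pvFix1 c :: p := by
  unfold pvFixA pvFix1
  simp only [PySem.List.pyGet?_zero_cons, PySem.List.slice_from_one, List.tail_cons,
    Option.some.injEq, List.cons_ne_nil, if_neg, not_false_eq_true]
  split <;> rfl

-- joint invariant: join over the mapped parts is the flag-true scan,
-- join with the head part kept raw is the flag-false scan
theorem pvMain (cs : List Char) :
    PySem.Chars.join ['-'] ((pvSplitDash cs).map pvFixA) = pvScan true cs
    ∧ (∀ p ps, pvSplitDash cs = p :: ps →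
        PySem.Chars.join ['-'] (p :: ps.map pvFixA) = pvScan false cs) := by
  induction cs with
  | nil =>
    constructor
    · simp [pvSplitDash, pvFixA, PySem.Chars.join, pvScan, List.intercalate]
    · intro p ps h
      simp only [pvSplitDash] at h
      cases h
      simp [PySem.Chars.join, pvScan, List.intercalate]
  | cons c rest ih =>
    obtain ⟨ih1, ih2⟩ := ih
    have hne := pvSplitDash_ne_nil rest
    by_cases hc : c = '-'
    · subst hc
      have hsd : pvSplitDash ('-' :: rest) = [] :: pvSplitDash rest := by
        simp [pvSplitDash]
      have hjoin : PySem.Chars.join ['-'] ([] :: (pvSplitDash rest).map pvFixA)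
          = '-' :: PySem.Chars.join ['-'] ((pvSplitDash rest).map pvFixA) := by
        cases hr : pvSplitDash rest with
        | nil => exact absurd hr hne
        | cons p ps => simp [PySem.Chars.join, List.intercalate]
      constructor
      · rw [hsd]
        simp only [List.map_cons]
        have : pvFixA [] = [] := by simp [pvFixA]
        rw [this, hjoin, ih1]
        have hup : PySem.Chars.upperChar '-' = '-' := by decide
        simp [pvScan, hup]
      · intro p ps h
        rw [hsd] at h
        cases h
        rw [hjoin, ih1]
        simp [pvScan]
    · cases hr : pvSplitDash rest with
      | nil => exact absurd hr hne
      | cons p ps =>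
        have hsd : pvSplitDash (c :: rest) = (c :: p) :: ps := by
          simp [pvSplitDash, hc, hr]
        have hjoin : ∀ x : Char, ∀ q : List Char,
            PySem.Chars.join ['-'] ((x :: q) :: ps.map pvFixA)
            = x :: PySem.Chars.join ['-'] (q :: ps.map pvFixA) := by
          intro x q
          cases ps <;> simp [PySem.Chars.join, List.intercalate]
        have hN := ih2 p ps hr
        constructor
        · rw [hsd]
          simp only [List.map_cons, pvFixA_cons]
          rw [hjoin, hN]
          simp [pvScan, pvFix1, hc]
          split <;> split <;> simp_all
        · intro p' ps' h
          rw [hsd] at h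
          cases h
          rw [hjoin, hN]
          simp [pvScan, hc]

-- ===== VERDICT (by name: the statement is the Claim_ definition above) =====
theorem fix_capitalization_spec : Claim_equal_fix_capitalization := by
  intro name _
  unfold Spec_fix_capitalization fix_capitalization fix_capitalization_alt
  rw [pvSplitOn_dash, pvFoldl_eq_map, List.nil_append, (pvMain name.toList).1]
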